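-- pv_equiv track=rewrite | github.com/yoeripoels/vce | explanation/evaluation.py | create_all_explanations
-- ===== SOURCE A (Python) =====
-- from itertools import permutations, product
--
-- def create_all_explanations(lines, class_a, class_b):
--     """Given all lines and class_a -> class_b, create a list of all possible explanations, where each
--     such explanation is a list of lines.
--     """
--     # get all lines we must change to go from a->b
--     to_swap = [i for i in range(len(lines)) if
--                (i in class_a and i not in class_b) or (i in class_b and i not in class_a)]
--     n_dif = len(to_swap)
--     all_swaps = list(permutations(list(range(n_dif))))
--     explanations = []
--     # create an explanation for each order of swaps
--     for i in range(len(all_swaps)):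
--         states = [class_a.copy()]
--         state = class_a.copy()
--         for j in range(n_dif):
--             line_idx = to_swap[all_swaps[i][j]]
--             if line_idx in state:  # must be removed
--                 state.remove(line_idx)
--             else:  # it was not in: should be added
--                 state.append(line_idx)
--             states.append(state.copy())
--         explanations.append(states)
--     return explanations
-- ===== SOURCE B (Python) =====
-- def create_all_explanations(lines, class_a, class_b):
--     """Recursive backtracking over the unused swap lines (lowest-index first),
--     building each explanation's state sequence top-down instead of rebuilding it
--     per permutation."""
--     to_swap = [i for i in range(len(lines)) if (i in class_a) != (i in class_b)]
--     explanations = []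
--
--     def backtrack(state, states, remaining):
--         if not remaining:
--             explanations.append(states)
--             return
--         for k in range(len(remaining)):
--             line_idx = remaining[k]
--             if line_idx in state:
--                 new_state = state.copy()
--                 new_state.remove(line_idx)
--             else:
--                 new_state = state + [line_idx]
--             backtrack(new_state, states + [new_state], remaining[:k] + remaining[k + 1:])
--
--     backtrack(class_a.copy(), [class_a.copy()], to_swap)
--     return explanations
-- ===== Notes on version B (the rewrite author's own statement) =====
-- stated objective: alternative
-- what changed: Replaced the itertools.permutations enumeration with per-permutation state rebuild by a recursive backtracking search that extends the state sequence incrementally while choosing unused swap lines lowest-first, so each explanation prefix is built once and shared down the recursion.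
import Mathlib
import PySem

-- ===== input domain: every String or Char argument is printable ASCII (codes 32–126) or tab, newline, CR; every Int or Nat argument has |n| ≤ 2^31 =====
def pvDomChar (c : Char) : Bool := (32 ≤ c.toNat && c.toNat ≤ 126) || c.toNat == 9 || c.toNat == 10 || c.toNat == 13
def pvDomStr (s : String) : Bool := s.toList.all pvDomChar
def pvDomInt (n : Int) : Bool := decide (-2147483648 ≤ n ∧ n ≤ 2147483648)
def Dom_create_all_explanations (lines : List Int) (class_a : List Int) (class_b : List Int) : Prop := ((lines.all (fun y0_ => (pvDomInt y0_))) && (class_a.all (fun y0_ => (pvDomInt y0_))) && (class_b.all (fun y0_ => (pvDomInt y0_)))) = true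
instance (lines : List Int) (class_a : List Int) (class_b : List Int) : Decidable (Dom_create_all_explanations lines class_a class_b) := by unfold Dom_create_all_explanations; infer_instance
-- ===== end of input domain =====

-- B builds explanations by recursive backtracking over the unused swap lines instead of
-- enumerating permutations up front and rebuilding every state sequence; same return value.

-- ===== PORT A =====
-- Port of A: to_swap by comprehension, all_swaps = list(permutations(range(n_dif))),
-- then for each permutation rebuild the state sequence with a fold carrying (states, state).
-- (The j-loop 'for j in range(n_dif)' reads all_swaps[i][j]; each permutation has length
-- n_dif, so it is transcribed as a fold over the permutation's elements.)
def create_all_explanations (lines : List Int) (class_a : List Int) (class_b : List Int) : List (List (List Int)) :=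
  let to_swap := (PySem.List.pyRange 0 (lines.length : Int) 1).filter
    (fun i => (class_a.contains i && !class_b.contains i) || (class_b.contains i && !class_a.contains i))
  let n_dif := to_swap.length
  let rng := PySem.List.pyRange 0 (n_dif : Int) 1
  let all_swaps := PySem.List.permutations rng rng.length
  all_swaps.map (fun perm =>
    (perm.foldl (fun (acc : List (List Int) × List Int) k =>
      let line_idx := PySem.List.pyGetD to_swap k 0
      let state := if acc.2.contains line_idx
        then (PySem.List.remove? acc.2 line_idx).getD acc.2
        else acc.2 ++ [line_idx]
      (acc.1 ++ [state], state)) ([class_a], class_a)).1)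

-- ===== PORT B =====
-- Port of Source B's backtrack: pick each unused swap line (in order), toggle it, recurse on the rest.
def pvBacktrack (state : List Int) (states : List (List Int)) (remaining : List Int) :
    List (List (List Int)) :=
  match remaining with
  | [] => [states]
  | y :: ys =>
    (List.range (y :: ys).length).attach.flatMap (fun k =>
      let line_idx := (y :: ys).getD k.1 0
      let new_state := if state.contains line_idx
        then (PySem.List.remove? state line_idx).getD state
        else state ++ [line_idx]
      pvBacktrack new_state (states ++ [new_state]) ((y :: ys).eraseIdx k.1))
termination_by remaining.length
decreasing_by
  have hk : k.1 < (y :: ys).length := List.mem_range.mp k.2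
  rw [List.length_eraseIdx_of_lt hk]
  simp

def create_all_explanations_alt (lines : List Int) (class_a : List Int) (class_b : List Int) : List (List (List Int)) :=
  let to_swap := (PySem.List.pyRange 0 (lines.length : Int) 1).filter
    (fun i => class_a.contains i != class_b.contains i)
  pvBacktrack class_a [class_a] to_swap

-- ===== PRECONDITION & SPEC =====
def Spec_create_all_explanations (lines : List Int) (class_a : List Int) (class_b : List Int) (out : List (List (List Int))) : Prop := out = create_all_explanations_alt lines class_a class_b
instance (lines : List Int) (class_a : List Int) (class_b : List Int) (out : List (List (List Int))) : Decidable (Spec_create_all_explanations lines class_a class_b out) := by unfold Spec_create_all_explanations; infer_instance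

-- ===== CLAIM (what is proved, stated in full; the proofs are below) =====
def Claim_equal_create_all_explanations : Prop := ∀ (lines : List Int) (class_a : List Int) (class_b : List Int), Dom_create_all_explanations lines class_a class_b → Spec_create_all_explanations lines class_a class_b (create_all_explanations lines class_a class_b)

-- ===== LEMMAS AND PROOFS =====

-- toggle a line in a state, and the resulting sequence of states
def pvToggle (st : List Int) (x : Int) : List Int :=
  if st.contains x then (PySem.List.remove? st x).getD st else st ++ [x]

def pvStatesOf (st : List Int) : List Int → List (List Int)
  | [] => []
  | x :: xs => pvToggle st x :: pvStatesOf (pvToggle st x) xs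

lemma pvFold_fst (p : List Int) (sts : List (List Int)) (st : List Int) :
    (p.foldl (fun (acc : List (List Int) × List Int) v =>
      (acc.1 ++ [pvToggle acc.2 v], pvToggle acc.2 v)) (sts, st)).1
      = sts ++ pvStatesOf st p := by
  induction p generalizing sts st with
  | nil => simp [pvStatesOf]
  | cons x xs ih => simp [pvStatesOf, ih]

lemma pvPerm_map (n : Nat) (g : Int → Int) : ∀ (l : List Int),
    PySem.List.permutations (l.map g) n = (PySem.List.permutations l n).map (List.map g) := by
  induction n with
  | zero => intro l; simp [PySem.List.permutations]
  | succ m ih =>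
    intro l
    simp only [PySem.List.permutations, List.length_map, List.map_flatMap]
    refine List.flatMap_congr ?_
    intro i _
    rcases h : l[i]? with _ | v
    · simp [List.getElem?_map, h]
    · simp only [List.getElem?_map, h, Option.map_some]
      rw [List.eraseIdx_map, ih]
      simp [List.map_map, Function.comp]

lemma pvFlatMap_attach {α β : Type} (l : List α) (F : α → List β) :
    l.attach.flatMap (fun x => F x.1) = l.flatMap F := by
  conv_rhs => rw [← List.attach_map_subtype_val l]
  rw [List.flatMap_map]

lemma pvBacktrack_eq : ∀ (n : Nat) (rem : List Int), rem.length = n →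
    ∀ (st : List Int) (sts : List (List Int)),
    pvBacktrack st sts rem
      = (PySem.List.permutations rem rem.length).map (fun p => sts ++ pvStatesOf st p) := by
  intro n
  induction n with
  | zero =>
    intro rem h st sts
    rw [List.length_eq_zero_iff] at h
    subst h
    rw [pvBacktrack.eq_def]
    simp [pvStatesOf]
  | succ m ih =>
    intro rem h st sts
    match rem, h with
    | x :: xs, h =>
      rw [pvBacktrack.eq_def]
      conv_rhs => rw [show (x :: xs).length = m + 1 from h, PySem.List.permutations]
      simp only [List.map_flatMap]
      rw [pvFlatMap_attach (List.range (x :: xs).length) (fun a =>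
        pvBacktrack
          (if st.contains ((x :: xs).getD a 0)
            then (PySem.List.remove? st ((x :: xs).getD a 0)).getD st
            else st ++ [(x :: xs).getD a 0])
          (sts ++ [if st.contains ((x :: xs).getD a 0)
            then (PySem.List.remove? st ((x :: xs).getD a 0)).getD st
            else st ++ [(x :: xs).getD a 0]])
          ((x :: xs).eraseIdx a))]
      refine List.flatMap_congr ?_
      intro k hk
      have hklt : k < (x :: xs).length := List.mem_range.mp hk
      have hget : (x :: xs)[k]? = some ((x :: xs).getD k 0) := by
        simp [List.getD, List.getElem?_eq_getElem hklt]
      simp only [hget]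
      have hlen : ((x :: xs).eraseIdx k).length = m := by
        rw [List.length_eraseIdx_of_lt hklt, h]
        omega
      rw [ih _ hlen, hlen]
      simp [List.map_map, Function.comp, pvStatesOf, pvToggle, List.append_assoc]

-- ===== VERDICT (by name: the statement is the Claim_ definition above) =====
theorem create_all_explanations_spec : Claim_equal_create_all_explanations := by
  intro lines ca cb _hdom
  unfold Spec_create_all_explanations create_all_explanations create_all_explanations_alt
  have hpred : (fun i => (ca.contains i && !cb.contains i) || (cb.contains i && !ca.contains i))
      = (fun i => ca.contains i != cb.contains i) := by
    funext i
    cases ca.contains i <;> cases cb.contains i <;> rfl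
  rw [hpred]
  set ts := (PySem.List.pyRange 0 (lines.length : Int) 1).filter
    (fun i => ca.contains i != cb.contains i) with hts
  have hfold : ∀ p : List Int,
      (p.foldl (fun (acc : List (List Int) × List Int) k =>
        let line_idx := PySem.List.pyGetD ts k 0
        let state := if acc.2.contains line_idx
          then (PySem.List.remove? acc.2 line_idx).getD acc.2
          else acc.2 ++ [line_idx]
        (acc.1 ++ [state], state)) ([ca], ca)).1
      = [ca] ++ pvStatesOf ca (p.map (fun k => PySem.List.pyGetD ts k 0)) := by
    intro p
    rw [← pvFold_fst]
    rw [List.foldl_map]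
    rfl
  simp only [hfold]
  rw [pvBacktrack_eq ts.length ts rfl]
  have hN : (PySem.List.pyRange 0 (ts.length : Int) 1).length = ts.length := by
    simp [PySem.List.length_pyRange_one]
  have hmap : (PySem.List.pyRange 0 (ts.length : Int) 1).map (fun k => PySem.List.pyGetD ts k 0) = ts :=
    PySem.List.map_pyGetD_pyRange_zero' ts 0
  calc (PySem.List.permutations (PySem.List.pyRange 0 (ts.length : Int) 1)
          (PySem.List.pyRange 0 (ts.length : Int) 1).length).map
        (fun p => [ca] ++ pvStatesOf ca (p.map (fun k => PySem.List.pyGetD ts k 0)))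
      = ((PySem.List.permutations (PySem.List.pyRange 0 (ts.length : Int) 1)
          (PySem.List.pyRange 0 (ts.length : Int) 1).length).map
          (List.map (fun k => PySem.List.pyGetD ts k 0))).map
        (fun p => [ca] ++ pvStatesOf ca p) := by rw [List.map_map]; rfl
    _ = (PySem.List.permutations ts ts.length).map (fun p => [ca] ++ pvStatesOf ca p) := by
        rw [← pvPerm_map, hmap, hN]
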